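-- pv_equiv track=rewrite | github.com/saltymermaid/aoc_2024 | advent9a.py | free_space_is_contiguous
-- ===== SOURCE A (Python) =====
-- def free_space_is_contiguous(disk):
--     data = True
--     for block in disk:
--         if data:
--             if block == ".":
--                 data = False
--         else:
--             if block != ".":
--                 return False
--     return True
-- ===== SOURCE B (Python) =====
-- def free_space_is_contiguous(disk):
--     try:
--         start = disk.index(".")
--     except ValueError:
--         return True
--     return all(b == "." for b in disk[start:])
-- ===== Notes on version B (the rewrite author's own statement) =====
-- stated objective: simpler
-- what changed: B first locates the data/free boundary with disk.index('.') and then validates the suffix with all() in a separate pass, instead of threading a mutable 'data' flag through one loop.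
import Mathlib
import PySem

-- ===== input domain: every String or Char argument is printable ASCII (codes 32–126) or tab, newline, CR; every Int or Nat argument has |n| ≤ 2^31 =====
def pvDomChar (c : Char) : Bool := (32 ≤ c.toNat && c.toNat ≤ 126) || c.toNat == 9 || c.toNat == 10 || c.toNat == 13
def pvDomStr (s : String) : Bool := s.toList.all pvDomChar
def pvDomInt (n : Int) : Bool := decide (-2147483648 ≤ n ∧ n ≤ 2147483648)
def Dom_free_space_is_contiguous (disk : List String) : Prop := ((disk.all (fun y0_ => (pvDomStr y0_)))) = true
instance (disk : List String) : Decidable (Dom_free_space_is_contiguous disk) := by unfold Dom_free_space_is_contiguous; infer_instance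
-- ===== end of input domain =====

-- B locates the first '.' with index() and then validates the suffix with all(), instead of
-- threading a mutable 'data' flag through one loop; objective: simpler decomposition, same cost.

-- ===== PORT A =====
-- the loop over `disk` with the mutable flag `data`; early `return False` becomes the `false` branch
def fscLoopA (data : Bool) : List String → Bool
  | [] => true
  | block :: rest =>
    if data then
      fscLoopA (if block == "." then false else data) rest
    else
      if block != "." then false else fscLoopA data rest

def free_space_is_contiguous (disk : List String) : Bool :=
  fscLoopA true disk

-- ===== PORT B =====
def free_space_is_contiguous_alt (disk : List String) : Bool :=
  match PySem.List.index? disk "." with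
  | none => true
  | some start => (PySem.List.slice disk (some (start : Int)) none).all (fun b => b == ".")

-- ===== PRECONDITION & SPEC =====
def Spec_free_space_is_contiguous (disk : List String) (out : Bool) : Prop := out = free_space_is_contiguous_alt disk
instance (disk : List String) (out : Bool) : Decidable (Spec_free_space_is_contiguous disk out) := by unfold Spec_free_space_is_contiguous; infer_instance

-- ===== CLAIM (what is proved, stated in full; the proofs are below) =====
def Claim_equal_free_space_is_contiguous : Prop := ∀ (disk : List String), Dom_free_space_is_contiguous disk → Spec_free_space_is_contiguous disk (free_space_is_contiguous disk)

-- ===== LEMMAS AND PROOFS =====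
theorem fscLoopA_false (xs : List String) : fscLoopA false xs = xs.all (fun b => b == ".") := by
  induction xs with
  | nil => rfl
  | cons b rest ih =>
    by_cases h : b = "."
    · simp [fscLoopA, h, ih]
    · simp [fscLoopA, h]

theorem fscLoopA_true_eq_alt (xs : List String) :
    fscLoopA true xs = free_space_is_contiguous_alt xs := by
  induction xs with
  | nil => rfl
  | cons b rest ih =>
    by_cases h : b = "."
    · subst h
      unfold free_space_is_contiguous_alt
      rw [PySem.List.index?_cons_self]
      simp [fscLoopA, fscLoopA_false, PySem.List.slice_none_none]
    · rw [show fscLoopA true (b :: rest) = fscLoopA true rest by simp [fscLoopA, h], ih]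
      unfold free_space_is_contiguous_alt
      rw [PySem.List.index?_cons_of_ne rest h]
      cases hidx : PySem.List.index? rest "." with
      | none => simp
      | some i =>
        simp only [Option.map_some]
        rw [PySem.List.slice_from_natCast, PySem.List.slice_from_natCast]
        simp [List.drop]

-- ===== VERDICT (by name: the statement is the Claim_ definition above) =====
theorem free_space_is_contiguous_spec : Claim_equal_free_space_is_contiguous := by
  intro disk _
  unfold Spec_free_space_is_contiguous free_space_is_contiguous
  exact fscLoopA_true_eq_alt disk
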